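-- pv_equiv track=rewrite | github.com/Aasthaengg/IBMdataset | Python_codes/p03855/s846933208.py | UF_make
-- ===== SOURCE A (Python) =====
-- def find_root(root,x):
--     y = root[x]
--     if x == y:
--         return x
--     z = find_root(root,y)
--     root[x] = z
--     return z
--
-- def merge(root,size,x,y):
--     x = find_root(root,x)
--     y = find_root(root,y)
--     if x == y:
--         return
--     sx,sy = size[x],size[y]
--     if sx < sy:
--         sx,sy = sy,sx
--         x,y = y,x
--     root[y] = x
--     size[x] += sy
--
-- def UF_make(graph,n):
--     Root=list(range(n+1))
--     Size=[1] * (n+1)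
--     for i in range(len(graph)):
--         merge(Root,Size,graph[i][0],graph[i][1])
--     for i in range(n+1):
--         Root[i] = find_root(Root,i)
--     Root.pop(0)  #
--     return Root
-- ===== SOURCE B (Python) =====
-- # B: iterative two-phase find (while-loop ascent, then a compression pass), a
-- # conditional-expression big/small union with the same strict tie-break, a
-- # while-loop flatten, and a slice instead of pop(0).
-- def find(parent, x):
--     path = []
--     while parent[x] != x:
--         path.append(x)
--         x = parent[x]
--     for v in path:
--         parent[v] = x
--     return x
--
-- def union(parent, size, x, y):
--     rx = find(parent, x)
--     ry = find(parent, y)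
--     if rx != ry:
--         big, small = (rx, ry) if size[ry] <= size[rx] else (ry, rx)
--         parent[small] = big
--         size[big] += size[small]
--
-- def UF_make(graph, n):
--     parent = list(range(n + 1))
--     size = [1 for _ in range(n + 1)]
--     for e in graph:
--         union(parent, size, e[0], e[1])
--     i = 0
--     while i <= n:
--         parent[i] = find(parent, i)
--         i += 1
--     return parent[1:]
-- ===== Notes on version B (the rewrite author's own statement) =====
-- stated objective: alternative
-- what changed: find is rewritten as an iterative two-phase loop (while-loop ascent collecting the path, then a compression pass) instead of recursion with write-on-unwind; union picks big/small via a conditional expression on sizes (same strict tie-break) instead of the tuple-swap trick; the size table is built by a comprehension; the flatten is a while loop with a manual counter; the result is the slice parent[1:] instead of an in-place pop(0).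
import Mathlib
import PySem

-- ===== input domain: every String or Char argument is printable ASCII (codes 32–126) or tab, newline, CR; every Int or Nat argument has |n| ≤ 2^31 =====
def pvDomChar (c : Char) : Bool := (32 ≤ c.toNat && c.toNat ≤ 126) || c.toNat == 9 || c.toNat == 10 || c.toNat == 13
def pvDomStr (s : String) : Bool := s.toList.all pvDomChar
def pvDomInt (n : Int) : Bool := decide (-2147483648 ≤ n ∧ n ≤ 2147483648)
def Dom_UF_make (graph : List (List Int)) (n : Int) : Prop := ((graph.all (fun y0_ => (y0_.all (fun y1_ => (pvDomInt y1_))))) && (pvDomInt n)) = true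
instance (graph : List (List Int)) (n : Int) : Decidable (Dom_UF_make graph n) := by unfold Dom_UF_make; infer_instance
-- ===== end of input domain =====

-- B: iterative two-phase find (while-loop ascent, then a compression pass), a
-- conditional-expression big/small union with the same strict tie-break, a
-- while-loop flatten with a manual counter, and a slice instead of pop(0).

-- ===== PORT A =====
-- find_root(root,x): recursive, compresses on unwind.  Fuel = root.length is a totality
-- guard only (inside Pre_ the parent structure is a forest, so it is never exhausted).
def findRootA : Nat → List Int → Int → List Int × Int
  | 0, root, x => (root, x)
  | f+1, root, x =>
    let y := PySem.List.pyGetD root x 0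
    if x = y then (root, x)
    else
      let p := findRootA f root y
      (PySem.List.pySetD p.1 x p.2, p.2)

-- merge(root,size,x,y) with the conditional swap, returning the mutated (root, size)
def mergeA (root size : List Int) (x y : Int) : List Int × List Int :=
  let p1 := findRootA root.length root x
  let p2 := findRootA p1.1.length p1.1 y
  if p1.2 = p2.2 then (p2.1, size)
  else
    let sx := PySem.List.pyGetD size p1.2 0
    let sy := PySem.List.pyGetD size p2.2 0
    let q := if sx < sy then (sy, sx, p2.2, p1.2) else (sx, sy, p1.2, p2.2)
    (PySem.List.pySetD p2.1 q.2.2.2 q.2.2.1,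
     PySem.List.pySetD size q.2.2.1 (PySem.List.pyGetD size q.2.2.1 0 + q.2.1))

def UF_make (graph : List (List Int)) (n : Int) : List Int :=
  let root0 := PySem.List.pyRange 0 (n+1) 1
  let size0 := List.replicate (n+1).toNat (1 : Int)
  -- for i in range(len(graph)): merge(Root, Size, graph[i][0], graph[i][1])
  let st := (PySem.List.pyRange 0 graph.length 1).foldl
    (fun (st : List Int × List Int) i =>
      let e := PySem.List.pyGetD graph i []
      mergeA st.1 st.2 (PySem.List.pyGetD e 0 0) (PySem.List.pyGetD e 1 0))
    (root0, size0)
  -- for i in range(n+1): Root[i] = find_root(Root, i)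
  let root1 := (PySem.List.pyRange 0 (n+1) 1).foldl
    (fun r i => let p := findRootA r.length r i; PySem.List.pySetD p.1 i p.2) st.1
  -- Root.pop(0); return Root
  ((PySem.List.pop? root1 0).map Prod.snd).getD root1

-- ===== PORT B =====
-- first while loop of B's find: ascend to the root, collecting the visited path
def ascendB : Nat → List Int → Int → List Int → List Int × Int
  | 0, _, v, acc => (acc, v)
  | fuel+1, par, v, acc =>
    let w := PySem.List.pyGetD par v 0
    if w ≠ v then ascendB fuel par w (acc ++ [v]) else (acc, v)

-- find(parent,x): ascend, then the compression for-loop over the path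
def findB (par : List Int) (a : Int) : List Int × Int :=
  let res := ascendB par.length par a []
  (res.fst.foldl (fun cur node => PySem.List.pySetD cur node res.snd) par, res.snd)

-- union: pick (big, small) by a conditional expression, same strict tie-break
def unionB (par sz : List Int) (a b : Int) : List Int × List Int :=
  let fa := findB par a
  let fb := findB fa.fst b
  if fa.snd ≠ fb.snd then
    let bs := if PySem.List.pyGetD sz fb.snd 0 ≤ PySem.List.pyGetD sz fa.snd 0
              then (fa.snd, fb.snd) else (fb.snd, fa.snd)
    (PySem.List.pySetD fb.fst bs.snd bs.fst,
     PySem.List.pySetD sz bs.fst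
       (PySem.List.pyGetD sz bs.fst 0 + PySem.List.pyGetD sz bs.snd 0))
  else (fb.fst, sz)

-- 'i = 0; while i <= n: parent[i] = find(parent, i); i += 1', fuel = number of rounds
def flattenB : Nat → Int → List Int → List Int
  | 0, _, par => par
  | rounds+1, k, par =>
    let res := findB par k
    flattenB rounds (k+1) (PySem.List.pySetD res.fst k res.snd)

def UF_make_alt (graph : List (List Int)) (n : Int) : List Int :=
  let par0 := PySem.List.pyRange 0 (n+1) 1
  -- size = [1 for _ in range(n + 1)]
  let sz0 := (PySem.List.pyRange 0 (n+1) 1).map (fun _ => (1 : Int))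
  -- for e in graph: union(parent, size, e[0], e[1])
  let fin := graph.foldl
    (fun (ps : List Int × List Int) ed =>
      unionB ps.fst ps.snd (PySem.List.pyGetD ed 0 0) (PySem.List.pyGetD ed 1 0))
    (par0, sz0)
  -- return parent[1:]
  PySem.List.slice (flattenB (n+1).toNat 0 fin.fst) (some 1) none

-- ===== PRECONDITION & SPEC =====
-- Pre_ excludes exactly the inputs on which Python A raises: n < 0 (Root.pop(0) on an
-- empty list), an edge with fewer than two entries, or an edge endpoint outside the
-- Python index range of the (n+1)-element Root list (IndexError).
def Pre_UF_make (graph : List (List Int)) (n : Int) : Prop :=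
  0 ≤ n ∧ ∀ e ∈ graph, 2 ≤ e.length ∧
    PySem.Raise.InRange (n+1).toNat (e.getD 0 0) ∧
    PySem.Raise.InRange (n+1).toNat (e.getD 1 0)
instance (graph : List (List Int)) (n : Int) : Decidable (Pre_UF_make graph n) := by
  unfold Pre_UF_make; infer_instance

def pvWitness_UF_make : List (List Int) × Int := ([[1, 2], [2, 3], [4, 4]], 5)

def Spec_UF_make (graph : List (List Int)) (n : Int) (out : List Int) : Prop := out = UF_make_alt graph n
instance (graph : List (List Int)) (n : Int) (out : List Int) : Decidable (Spec_UF_make graph n out) := by unfold Spec_UF_make; infer_instance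

-- ===== CLAIM (what is proved, stated in full; the proofs are below) =====
def Claim_equal_UF_make : Prop := ∀ (graph : List (List Int)) (n : Int), Dom_UF_make graph n → Pre_UF_make graph n → Spec_UF_make graph n (UF_make graph n)

-- ===== LEMMAS AND PROOFS =====

-- pySetD with the same value commutes (different cells commute; the same cell is overwritten)
lemma pySetD_comm_same (a : List Int) (i j z : Int) :
    PySem.List.pySetD (PySem.List.pySetD a i z) j z
      = PySem.List.pySetD (PySem.List.pySetD a j z) i z := by
  simp only [PySem.List.pySetD, PySem.List.pySet?]
  rcases hi : PySem.List.pyIdx? a.length i with _ | ki <;>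
  rcases hj : PySem.List.pyIdx? a.length j with _ | kj <;>
    simp [hi, hj, List.length_set]
  by_cases h : ki = kj
  · subst h; simp [List.set_set]
  · exact List.set_comm z z h

-- the accumulator of ascendB only prefixes the returned path
lemma ascendB_acc (f : Nat) (root : List Int) (x : Int) (path : List Int) :
    ascendB f root x path
      = (path ++ (ascendB f root x []).1, (ascendB f root x []).2) := by
  induction f generalizing x path with
  | zero => simp [ascendB]
  | succ f ih =>
    simp only [ascendB]
    by_cases h : PySem.List.pyGetD root x 0 = x
    · simp [h]
    · simp only [h, ne_eq, not_false_eq_true, if_true]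
      rw [ih _ (path ++ [x]), ih _ ([] ++ [x])]
      simp

-- pushing one same-valued write under the compression fold
lemma fold_set_comm (p : List Int) (a : List Int) (x z : Int) :
    p.foldl (fun a v => PySem.List.pySetD a v z) (PySem.List.pySetD a x z)
      = PySem.List.pySetD (p.foldl (fun a v => PySem.List.pySetD a v z) a) x z := by
  induction p generalizing a with
  | nil => rfl
  | cons v p ih =>
    simp only [List.foldl_cons]
    rw [pySetD_comm_same, ih]

-- the two find implementations produce the same state and the same root:
-- A reads the whole path before any write and then writes the path nodes to the root
-- on unwind; B reads the same path in the ascent and writes the same cells the same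
-- value in the compression pass.
lemma find_eq_gen (f : Nat) (root : List Int) (x : Int) :
    findRootA f root x
      = ((ascendB f root x []).1.foldl
           (fun a v => PySem.List.pySetD a v (ascendB f root x []).2) root,
         (ascendB f root x []).2) := by
  induction f generalizing x with
  | zero => simp [findRootA, ascendB]
  | succ f ih =>
    simp only [findRootA, ascendB]
    by_cases h : x = PySem.List.pyGetD root x 0
    · rw [if_pos h]
      simp [h.symm]
    · have h' : (PySem.List.pyGetD root x 0 ≠ x) := fun e => h e.symm
      rw [if_neg h]
      simp only [h', ne_eq, not_false_eq_true, if_true]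
      simp only [List.nil_append]
      rw [ascendB_acc f root (PySem.List.pyGetD root x 0) [x]]
      simp only [List.singleton_append, List.foldl_cons]
      rw [fold_set_comm]
      rw [ih (PySem.List.pyGetD root x 0)]

lemma find_eq (root : List Int) (x : Int) :
    findRootA root.length root x = findB root x := by
  rw [findB, find_eq_gen]

-- A's swap-then-update merge equals B's conditional-expression union
lemma merge_eq (root size : List Int) (x y : Int) :
    mergeA root size x y = unionB root size x y := by
  simp only [mergeA, unionB, find_eq]
  by_cases h : (findB root x).2 = (findB (findB root x).1 y).2
  · simp [h]
  · simp only [h, ne_eq, not_false_eq_true, if_true]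
    by_cases hs : PySem.List.pyGetD size (findB root x).2 0
        < PySem.List.pyGetD size (findB (findB root x).1 y).2 0
    · have hle : ¬ (PySem.List.pyGetD size (findB (findB root x).1 y).2 0
          ≤ PySem.List.pyGetD size (findB root x).2 0) := by omega
      simp [hs, hle]
    · have hle : PySem.List.pyGetD size (findB (findB root x).1 y).2 0
          ≤ PySem.List.pyGetD size (findB root x).2 0 := by omega
      simp [hs, hle]

-- Root.pop(0); return Root  ==  return parent[1:]
lemma pop_eq_slice (l : List Int) :
    ((PySem.List.pop? l 0).map Prod.snd).getD l = PySem.List.slice l (some 1) none := by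
  cases l with
  | nil => rfl
  | cons h t => rw [PySem.List.pop?_zero_cons, PySem.List.slice_from_one]; rfl

-- A's indexed edge loop equals B's direct iteration over the edges
lemma edge_fold (graph : List (List Int)) (init : List Int × List Int) :
    (PySem.List.pyRange 0 graph.length 1).foldl
      (fun (st : List Int × List Int) i =>
        unionB st.1 st.2 (PySem.List.pyGetD (PySem.List.pyGetD graph i []) 0 0)
          (PySem.List.pyGetD (PySem.List.pyGetD graph i []) 1 0)) init
    = graph.foldl
        (fun st e => unionB st.1 st.2 (PySem.List.pyGetD e 0 0) (PySem.List.pyGetD e 1 0))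
        init := by
  conv_rhs => rw [← PySem.List.map_pyGetD_pyRange_zero graph ([] : List Int)]
  rw [List.foldl_map]
  rfl

-- '[1]*(n+1)' and '[1 for _ in range(n+1)]' build the same list
lemma size_init (n : Int) (hn : 0 ≤ n) :
    (PySem.List.pyRange 0 (n+1) 1).map (fun _ => (1 : Int))
      = List.replicate (n+1).toNat (1 : Int) := by
  have h : (n + 1) = (((n+1).toNat : Nat) : Int) := by omega
  rw [h, PySem.List.pyRange_zero_natCast]
  simp [List.map_map, List.eq_replicate_iff]
  omega

-- B's counting while-loop flatten equals A's for-range flatten fold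
lemma flatten_eq (k : Nat) (i : Int) (root : List Int) :
    flattenB k i root
      = (PySem.List.pyRange i (i + k) 1).foldl
          (fun r j => let p := findB r j; PySem.List.pySetD p.1 j p.2) root := by
  induction k generalizing i root with
  | zero => simp [flattenB, PySem.List.pyRange]
  | succ k ih =>
    have hcons : PySem.List.pyRange i (i + (k+1 : Nat)) 1
        = i :: PySem.List.pyRange (i+1) (i + (k+1 : Nat)) 1 := by
      apply PySem.List.pyRange_one_cons
      push_cast; omega
    rw [flattenB, hcons, List.foldl_cons, ih]
    congr 1
    push_cast; ring_nf

lemma UF_eq (graph : List (List Int)) (n : Int) (hn : 0 ≤ n) :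
    UF_make graph n = UF_make_alt graph n := by
  unfold UF_make UF_make_alt
  simp only [merge_eq, edge_fold, pop_eq_slice, size_init n hn]
  congr 1
  rw [flatten_eq]
  have h0 : ((0 : Int) + ((n+1).toNat : Int)) = n + 1 := by omega
  rw [h0]
  simp only [find_eq]

-- ===== VERDICT (by name: the statement is the Claim_ definition above) =====
theorem UF_make_spec : Claim_equal_UF_make := by
  intro graph n _ hpre
  unfold Spec_UF_make
  exact UF_eq graph n hpre.1
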